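-- pv_equiv track=rewrite | github.com/QuBenhao/LeetCode | problems/problems_LCP_40/solution.py | maxmiumScore
-- ===== SOURCE A (Python) =====
-- from typing import List
--
-- def maxmiumScore(cards: List[int], cnt: int) -> int:
--     cards.sort(reverse=True)
--     s = sum(cards[:cnt])
--     if s % 2 == 0:
--         return s
--
--     def replace_sum(x: int) -> int:
--         for v in cards[cnt:]:
--             if v % 2 != x % 2:
--                 return s - x + v
--         return 0
--
--     cur = cards[cnt - 1]
--     ans = replace_sum(cur)
--     for v in cards[cnt-1::-1]:
--         if v % 2 != cur % 2:
--             ans = max(ans, replace_sum(v))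
--             break
--     return ans
-- ===== SOURCE B (Python) =====
-- from typing import List
--
-- def maxmiumScore(cards: List[int], cnt: int) -> int:
--     cards.sort(reverse=True)
--     sel = cards[:cnt]
--     s = sum(sel)
--     if s % 2 == 0:
--         return s
--     # parity partition of the whole (sorted) list, with prefix sums
--     odds = [v for v in cards if v % 2 == 1]
--     evens = [v for v in cards if v % 2 == 0]
--     po = [0]
--     for v in odds:
--         po.append(po[-1] + v)
--     pe = [0]
--     for v in evens:
--         pe.append(pe[-1] + v)
--     j = sum(1 for v in sel if v % 2 == 1)   # selected odds; >= 1 since s is odd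
--     e = len(sel) - j                        # selected evens
--     # flip the parity of the odd-count by one, via prefix-sum arithmetic
--     c1 = po[j - 1] + pe[e + 1] if e + 1 <= len(evens) else 0
--     if e == 0:
--         return c1
--     c2 = po[j + 1] + pe[e - 1] if j + 1 <= len(odds) else 0
--     return max(c1, c2)
-- ===== Notes on version B (the rewrite author's own statement) =====
-- stated objective: alternative
-- what changed: A repairs an odd top-cnt sum by scanning: replace_sum walks the tail for the first opposite-parity card and a backward loop with break re-scans for the first opposite-parity selected card; B never scans for swap partners at all: it partitions the sorted list by parity, builds prefix-sum tables po/pe, counts the selected odds j, and obtains both repaired sums directly as po[j-1]+pe[e+1] and po[j+1]+pe[e-1] (shift the odd/even split count by one).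
-- crash fix: On inputs with cnt > len(cards) and an odd total sum, A raises IndexError (cards[cnt-1] is out of range) while B returns 0 (no parity-fixing split exists). — e.g. on maxmiumScore([3], 2): A raises IndexError, B returns 0
import Mathlib
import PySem

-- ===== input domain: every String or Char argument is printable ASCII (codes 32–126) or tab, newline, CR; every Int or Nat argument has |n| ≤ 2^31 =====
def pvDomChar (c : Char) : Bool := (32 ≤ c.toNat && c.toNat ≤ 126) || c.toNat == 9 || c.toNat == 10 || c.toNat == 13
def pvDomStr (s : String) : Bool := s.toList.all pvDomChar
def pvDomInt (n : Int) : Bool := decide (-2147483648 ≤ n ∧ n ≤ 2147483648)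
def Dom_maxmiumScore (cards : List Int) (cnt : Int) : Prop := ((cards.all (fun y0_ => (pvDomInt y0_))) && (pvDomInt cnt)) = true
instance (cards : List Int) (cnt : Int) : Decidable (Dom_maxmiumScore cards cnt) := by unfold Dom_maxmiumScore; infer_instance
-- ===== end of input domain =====

-- B replaces A's scan-for-swap-partner repair (replace_sum + backward loop with break) by a
-- parity partition with prefix-sum tables: both repaired sums are read off as po/pe entries
-- (alternative decomposition, same cost). Both sort `cards` in place on the Python side.


-- ===== PORT A =====
-- inner helper `replace_sum x`: scan cards[cnt:] for the first card of opposite parity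
def pvReplaceSum (tail : List Int) (s x : Int) : Int :=
  match tail with
  | [] => 0
  | v :: rest =>
      if PySem.Int.mod v 2 ≠ PySem.Int.mod x 2 then s - x + v else pvReplaceSum rest s x

-- the backward for-loop with break: first card of parity opposite to cur, if any
def pvFindOpp (l : List Int) (cur : Int) : Option Int :=
  match l with
  | [] => none
  | v :: rest =>
      if PySem.Int.mod v 2 ≠ PySem.Int.mod cur 2 then some v else pvFindOpp rest cur

def maxmiumScore (cards : List Int) (cnt : Int) : Int :=
  let sortedCards := PySem.List.sorted cards (fun x => x) true
  let s := (PySem.List.slice sortedCards none (some cnt)).sum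
  if PySem.Int.mod s 2 = 0 then s
  else
    match PySem.List.pyGet? sortedCards (cnt - 1) with
    | none => 0  -- Python raises IndexError here; excluded by Pre_
    | some cur =>
      let ans := pvReplaceSum (PySem.List.slice sortedCards (some cnt) none) s cur
      match pvFindOpp ((PySem.List.slice? sortedCards (some (cnt - 1)) none (-1)).getD []) cur with
      | none => ans
      | some v => max ans (pvReplaceSum (PySem.List.slice sortedCards (some cnt) none) s v)

-- ===== PORT B =====
def maxmiumScore_alt (cards : List Int) (cnt : Int) : Int :=
  let sortedCards := PySem.List.sorted cards (fun x => x) true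
  let sel := PySem.List.slice sortedCards none (some cnt)
  let s := sel.sum
  if PySem.Int.mod s 2 = 0 then s
  else
    let odds := sortedCards.filter (fun v => decide (PySem.Int.mod v 2 = 1))
    let evens := sortedCards.filter (fun v => decide (PySem.Int.mod v 2 = 0))
    let po := odds.foldl (fun acc v => acc ++ [acc.getLastD 0 + v]) [0]
    let pe := evens.foldl (fun acc v => acc ++ [acc.getLastD 0 + v]) [0]
    let j := (sel.filter (fun v => decide (PySem.Int.mod v 2 = 1))).length
    let e := sel.length - j
    let c1 := if e + 1 ≤ evens.length then
        (PySem.List.pyGet? po ((j : Int) - 1)).getD 0 + (PySem.List.pyGet? pe ((e : Int) + 1)).getD 0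
      else 0
    if e = 0 then c1
    else
      let c2 := if j + 1 ≤ odds.length then
          (PySem.List.pyGet? po ((j : Int) + 1)).getD 0 + (PySem.List.pyGet? pe ((e : Int) - 1)).getD 0
        else 0
      max c1 c2

-- ===== PRECONDITION & SPEC =====
-- Pre_ is exactly where A returns normally: A raises (IndexError) precisely when the selected
-- top-cnt sum is odd and cnt-1 is not a valid (possibly negative) Python index; in the two
-- out-of-range disjuncts below the selected sum is forced to be even, so A returns.
def Pre_maxmiumScore (cards : List Int) (cnt : Int) : Prop :=
  (1 - (cards.length : Int) ≤ cnt ∧ cnt ≤ (cards.length : Int)) ∨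
  cnt ≤ -(cards.length : Int) ∨
  ((cards.length : Int) < cnt ∧ cards.sum % 2 = 0)
instance (cards : List Int) (cnt : Int) : Decidable (Pre_maxmiumScore cards cnt) := by
  unfold Pre_maxmiumScore; infer_instance

def pvWitness_maxmiumScore : List Int × Int := ([3, 1, 4, 2], 3)

-- A raises IndexError exactly when cnt exceeds the list length and the total sum is odd;
-- B returns 0 there (no parity-fixing split exists).
def Raises_maxmiumScore (cards : List Int) (cnt : Int) : Prop :=
  (cards.length : Int) < cnt ∧ cards.sum % 2 = 1
instance (cards : List Int) (cnt : Int) : Decidable (Raises_maxmiumScore cards cnt) := by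
  unfold Raises_maxmiumScore; infer_instance
def pvRaiseWitness_maxmiumScore : List Int × Int := ([3], 2)
def pvRaiseWitnessOut_maxmiumScore : Int := 0

def Spec_maxmiumScore (cards : List Int) (cnt : Int) (out : Int) : Prop := out = maxmiumScore_alt cards cnt
instance (cards : List Int) (cnt : Int) (out : Int) : Decidable (Spec_maxmiumScore cards cnt out) := by unfold Spec_maxmiumScore; infer_instance

-- ===== CLAIM (what is proved, stated in full; the proofs are below) =====
def Claim_equal_maxmiumScore : Prop := ∀ (cards : List Int) (cnt : Int), Dom_maxmiumScore cards cnt → Pre_maxmiumScore cards cnt → Spec_maxmiumScore cards cnt (maxmiumScore cards cnt)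

def Claim_raises_maxmiumScore : Prop := (∀ (cards : List Int) (cnt : Int), Dom_maxmiumScore cards cnt → Raises_maxmiumScore cards cnt → ¬ Pre_maxmiumScore cards cnt) ∧ (Dom_maxmiumScore (pvRaiseWitness_maxmiumScore.1) (pvRaiseWitness_maxmiumScore.2) ∧ Raises_maxmiumScore (pvRaiseWitness_maxmiumScore.1) (pvRaiseWitness_maxmiumScore.2) ∧ maxmiumScore_alt (pvRaiseWitness_maxmiumScore.1) (pvRaiseWitness_maxmiumScore.2) = pvRaiseWitnessOut_maxmiumScore)

-- ===== LEMMAS AND PROOFS =====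

-- Python % 2 on Int takes values in {0, 1}
theorem pvMod2_cases (v : Int) : PySem.Int.mod v 2 = 0 ∨ PySem.Int.mod v 2 = 1 := by
  rw [PySem.Int.mod_eq_emod_of_pos (by omega)]; omega

theorem pvMod2_emod (v : Int) : PySem.Int.mod v 2 = v % 2 :=
  PySem.Int.mod_eq_emod_of_pos (by omega)

-- pvReplaceSum is pvFindOpp followed by the arithmetic fix-up
theorem pvReplaceSum_eq (t : List Int) (s x : Int) :
    pvReplaceSum t s x = (pvFindOpp t x).elim 0 (fun v => s - x + v) := by
  induction t with
  | nil => rfl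
  | cons v rest ih => simp only [pvReplaceSum, pvFindOpp]; split <;> simp [ih]

-- pvFindOpp is find? with the opposite-parity test
theorem pvFindOpp_eq (l : List Int) (cur : Int) :
    pvFindOpp l cur = (l.filter (fun v => decide (PySem.Int.mod v 2 ≠ PySem.Int.mod cur 2))).head? := by
  rw [List.head?_filter]
  induction l with
  | nil => rfl
  | cons v rest ih =>
      rw [pvFindOpp, List.find?_cons]
      by_cases h : PySem.Int.mod v 2 ≠ PySem.Int.mod cur 2
      · simp only [if_pos h, decide_eq_true h]
      · simp only [if_neg h, decide_eq_false h, ih]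

-- auxiliary: getLast? skips the head of a cons when the tail is nonempty
theorem pvGetLast?_cons_of_ne_nil (x : Int) (l : List Int) (h : l ≠ []) :
    (x :: l).getLast? = l.getLast? := by
  cases l with
  | nil => exact absurd rfl h
  | cons y u => simp [List.getLast?_cons_cons]

-- fold facts on descending lists
theorem pvFoldlMax_of_le (l : List Int) (x : Int) (h : ∀ y ∈ l, y ≤ x) :
    l.foldl max x = x := by
  induction l generalizing x with
  | nil => rfl
  | cons y t ih =>
      simp only [List.foldl_cons]
      rw [max_eq_left (h y (by simp))]
      exact ih x fun z hz => h z (by simp [hz])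

theorem pvMax?_desc (l : List Int) (h : l.Pairwise (fun a b => b ≤ a)) :
    l.max? = l.head? := by
  cases l with
  | nil => rfl
  | cons x t =>
      simp only [List.max?_cons', List.head?_cons]
      rw [pvFoldlMax_of_le t x (fun y hy => List.rel_of_pairwise_cons h hy)]

theorem pvMin?_desc (l : List Int) (h : l.Pairwise (fun a b => b ≤ a)) :
    l.min? = l.getLast? := by
  induction l with
  | nil => rfl
  | cons x t ih =>
      cases t with
      | nil => rfl
      | cons y u =>
          have hle : y ≤ x := List.rel_of_pairwise_cons h (by simp)
          have htail := ih (List.Pairwise.of_cons h)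
          rw [List.min?_cons', List.foldl_cons, min_eq_right hle, List.getLast?_cons_cons]
          rw [List.min?_cons'] at htail
          exact htail

-- the last element of l survives the filter as the filtered list's last element
theorem pvGetLast?_filter (l : List Int) (p : Int → Bool) (h : l ≠ []) (hp : p (l.getLast h) = true) :
    (l.filter p).getLast? = some (l.getLast h) := by
  induction l with
  | nil => exact absurd rfl h
  | cons x t ih =>
      cases t with
      | nil => simp only [List.getLast_singleton] at hp; simp [hp]
      | cons y u =>
          have hne : (y :: u) ≠ ([] : List Int) := by simp
          rw [List.getLast_cons hne] at hp
          have htail := ih hne hp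
          have hfne : (y :: u).filter p ≠ [] := by
            intro hnil; rw [hnil] at htail; simp at htail
          rw [List.filter_cons]
          split
          · rw [pvGetLast?_cons_of_ne_nil _ _ hfne, List.getLast_cons hne]
            exact htail
          · rw [List.getLast_cons hne]
            exact htail

-- an odd sum forces an odd element
theorem pvOddMem (l : List Int) (h : l.sum % 2 = 1) :
    l.filter (fun v => decide (PySem.Int.mod v 2 = 1)) ≠ [] := by
  induction l with
  | nil => simp at h
  | cons x t ih =>
      rw [List.filter_cons]
      by_cases hx : PySem.Int.mod x 2 = 1
      · have hx' : x % 2 = 1 := by rw [← pvMod2_emod]; exact hx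
        simp [hx']
      · have hx' : x % 2 ≠ 1 := by rw [← pvMod2_emod]; exact hx
        have ht : t.sum % 2 = 1 := by
          simp only [List.sum_cons] at h; omega
        rw [decide_eq_false hx]
        simpa using ih ht

-- backward filterMap from a valid non-negative start index a: the reversed prefix
theorem pvBackCore (xs : List Int) (a : Nat) (h : a < xs.length) :
    List.filterMap (fun k : Nat => xs[((a : Int) + -(k : Int)).toNat]?) (List.range (a + 1)) =
      (xs.take (a + 1)).reverse := by
  have hstep : ∀ k ∈ List.range (a + 1),
      xs[((a : Int) + -(k : Int)).toNat]? = some (xs.getD (a - k) 0) := by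
    intro k hk
    rw [List.mem_range] at hk
    have he : ((a : Int) + -(k : Int)).toNat = a - k := by omega
    rw [he, List.getElem?_eq_getElem (by omega), List.getD_eq_getElem _ _ (by omega)]
  rw [List.filterMap_congr hstep,
      show (fun k => some (xs.getD (a - k) 0)) = some ∘ (fun k => xs.getD (a - k) 0) from rfl,
      List.filterMap_eq_map]
  apply List.ext_getElem
  · simp; omega
  · intro i hi1 hi2
    simp only [List.getElem_map, List.getElem_range, List.getElem_reverse, List.getElem_take]
    rw [List.getD_eq_getElem _ _ (by simp at hi1 ⊢; omega)]
    congr 1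
    simp [List.length_take] at hi2 ⊢
    omega

-- cards[cnt-1::-1] with 0 ≤ cnt-1 < len is the reversed prefix of length cnt
theorem pvSliceBack (xs : List Int) (a : Nat) (h : a < xs.length) :
    PySem.List.slice? xs (some (a : Int)) none (-1) = some ((xs.take (a + 1)).reverse) := by
  have hlen : (a : Int) ≤ (xs.length : Int) - 1 := by omega
  have h1 : ¬((a : Int) < 0) := by omega
  have h2 : min (a : Int) ((xs.length : Int) - 1) = (a : Int) := min_eq_left hlen
  have h3 : (-1 : Int) < (a : Int) := by omega
  simp only [PySem.List.slice?, PySem.List.sliceIndices]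
  norm_num [if_neg h1, h2, h3]
  exact pvBackCore xs a h

-- the same for a negative start index -m (Python wraps it to len-m)
theorem pvSliceBackNeg (xs : List Int) (m : Nat) (hm : 0 < m) (hml : m ≤ xs.length) :
    PySem.List.slice? xs (some (-(m : Int))) none (-1) =
      some ((xs.take (xs.length - m + 1)).reverse) := by
  have h1 : (-(m : Int)) < 0 := by omega
  have h2 : max (-(m : Int) + (xs.length : Int)) (-1) = ((xs.length - m : Nat) : Int) := by
    push_cast [hml]; omega
  simp only [PySem.List.slice?, PySem.List.sliceIndices]
  norm_num [h1, h2]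
  rw [if_pos hm]
  have h3 : (-1 : Int) < ((xs.length - m : Nat) : Int) := by omega
  rw [if_pos h3]
  have h4 : (((xs.length - m : Nat) : Int) + 1).toNat = (xs.length - m) + 1 := by omega
  rw [h4]
  exact pvBackCore xs (xs.length - m) (by omega)

-- A's scan-with-break candidates, characterised by the four parity extrema
theorem pvCore (sel t : List Int) (s : Int)
    (hseld : sel.Pairwise (fun a b => b ≤ a)) (htd : t.Pairwise (fun a b => b ≤ a))
    (hne : sel ≠ []) (hodd : sel.sum % 2 = 1) :
    (match pvFindOpp sel.reverse (sel.getLast hne) with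
     | none => pvReplaceSum t s (sel.getLast hne)
     | some v => max (pvReplaceSum t s (sel.getLast hne)) (pvReplaceSum t s v)) =
    (let minOdd := (sel.filter (fun v => decide (PySem.Int.mod v 2 = 1))).min?
     let minEven := (sel.filter (fun v => decide (PySem.Int.mod v 2 = 0))).min?
     let maxOdd := (t.filter (fun v => decide (PySem.Int.mod v 2 = 1))).max?
     let maxEven := (t.filter (fun v => decide (PySem.Int.mod v 2 = 0))).max?
     let c1 := match maxEven with
       | some me => s - minOdd.getD 0 + me
       | none => 0
     match minEven with
     | none => c1
     | some mEv =>
         let c2 := match maxOdd with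
           | some mo => s - mEv + mo
           | none => 0
         max c1 c2) := by
  have hrepl : ∀ x, pvReplaceSum t s x =
      ((t.filter (fun v => decide (PySem.Int.mod v 2 ≠ PySem.Int.mod x 2))).max?).elim 0
        (fun v => s - x + v) := by
    intro x
    rw [pvReplaceSum_eq, pvFindOpp_eq, ← pvMax?_desc _ (htd.filter _)]
  have hOppEven : ∀ (x : Int), PySem.Int.mod x 2 = 1 →
      (fun v => decide (PySem.Int.mod v 2 ≠ PySem.Int.mod x 2)) =
      (fun v => decide (PySem.Int.mod v 2 = 0)) := by
    intro x hx; funext v; rcases pvMod2_cases v with h | h <;> simp only [h, hx] <;> decide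
  have hOppOdd : ∀ (x : Int), PySem.Int.mod x 2 = 0 →
      (fun v => decide (PySem.Int.mod v 2 ≠ PySem.Int.mod x 2)) =
      (fun v => decide (PySem.Int.mod v 2 = 1)) := by
    intro x hx; funext v; rcases pvMod2_cases v with h | h <;> simp only [h, hx] <;> decide
  have hfind : pvFindOpp sel.reverse (sel.getLast hne) =
      (sel.filter (fun v => decide (PySem.Int.mod v 2 ≠ PySem.Int.mod (sel.getLast hne) 2))).min? := by
    rw [pvFindOpp_eq, List.filter_reverse, List.head?_reverse, ← pvMin?_desc _ (hseld.filter _)]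
  rcases pvMod2_cases (sel.getLast hne) with hcur | hcur
  · -- cur even: minEven = cur, the backward loop finds the smallest selected odd
    have hminEven : (sel.filter (fun v => decide (PySem.Int.mod v 2 = 0))).min? = some (sel.getLast hne) := by
      rw [pvMin?_desc _ (hseld.filter _), pvGetLast?_filter sel _ hne (decide_eq_true hcur)]
    obtain ⟨mo, hmo⟩ : ∃ mo, (sel.filter (fun v => decide (PySem.Int.mod v 2 = 1))).min? = some mo := by
      rcases Option.eq_none_or_eq_some ((sel.filter (fun v => decide (PySem.Int.mod v 2 = 1))).min?) with hn | hsome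
      · exact absurd (List.min?_eq_none_iff.mp hn) (pvOddMem sel hodd)
      · exact hsome
    have hmoOdd : PySem.Int.mod mo 2 = 1 := by
      have hmem := List.min?_mem hmo
      rw [List.mem_filter] at hmem
      exact of_decide_eq_true hmem.2
    simp only [hrepl, hfind, hOppOdd _ hcur, hmo, hminEven, hOppEven _ hmoOdd,
      Option.getD_some]
    cases (t.filter (fun v => decide (PySem.Int.mod v 2 = 1))).max? with
    | none =>
        cases (t.filter (fun v => decide (PySem.Int.mod v 2 = 0))).max? with
        | none => simp
        | some me => simp [max_comm]
    | some mo' =>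
        cases (t.filter (fun v => decide (PySem.Int.mod v 2 = 0))).max? with
        | none => simp [max_comm]
        | some me => simp [max_comm]
  · -- cur odd: minOdd = cur, the backward loop finds the smallest selected even
    have hminOdd : (sel.filter (fun v => decide (PySem.Int.mod v 2 = 1))).min? = some (sel.getLast hne) := by
      rw [pvMin?_desc _ (hseld.filter _), pvGetLast?_filter sel _ hne (decide_eq_true hcur)]
    simp only [hrepl, hfind, hOppEven _ hcur, hminOdd, Option.getD_some]
    cases hme : (sel.filter (fun v => decide (PySem.Int.mod v 2 = 0))).min? with
    | none =>
        cases (t.filter (fun v => decide (PySem.Int.mod v 2 = 0))).max? with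
        | none => simp
        | some me => simp
    | some mEv =>
        have hmEvEven : PySem.Int.mod mEv 2 = 0 := by
          have hmem := List.min?_mem hme
          rw [List.mem_filter] at hmem
          exact of_decide_eq_true hmem.2
        simp only [hOppOdd _ hmEvEven]
        cases (t.filter (fun v => decide (PySem.Int.mod v 2 = 0))).max? with
        | none =>
            cases (t.filter (fun v => decide (PySem.Int.mod v 2 = 1))).max? with
            | none => simp
            | some mo => simp
        | some me =>
            cases (t.filter (fun v => decide (PySem.Int.mod v 2 = 1))).max? with
            | none => simp
            | some mo => simp

-- ---- prefix-sum table lemmas for B ----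

theorem pvGetLastD_append (a m : List Int) (hm : m ≠ []) :
    (a ++ m).getLastD 0 = m.getLastD 0 := by
  cases m with
  | nil => exact absurd rfl hm
  | cons y u =>
      have h2 : (y :: u).getLast? = some ((y :: u).getLast (by simp)) :=
        List.getLast?_eq_some_getLast _
      simp [List.getLastD_eq_getLast?, List.getLast?_append, h2]

theorem pvPrefixAppend (l a m : List Int) (hm : m ≠ []) :
    l.foldl (fun acc v => acc ++ [acc.getLastD 0 + v]) (a ++ m) =
      a ++ l.foldl (fun acc v => acc ++ [acc.getLastD 0 + v]) m := by
  induction l generalizing m with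
  | nil => rfl
  | cons v t ih =>
      simp only [List.foldl_cons]
      rw [pvGetLastD_append a m hm, List.append_assoc]
      exact ih (m ++ [m.getLastD 0 + v]) (by simp)

theorem pvPrefixGet (l : List Int) (c : Int) (i : Nat) (h : i ≤ l.length) :
    (l.foldl (fun acc v => acc ++ [acc.getLastD 0 + v]) [c])[i]? =
      some (c + (l.take i).sum) := by
  induction l generalizing c i with
  | nil =>
      have h0 : i = 0 := by simpa using h
      subst h0; simp
  | cons v t ih =>
      have hfv : List.foldl (fun acc x => acc ++ [acc.getLastD 0 + x]) [c] (v :: t) =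
          [c] ++ List.foldl (fun acc x => acc ++ [acc.getLastD 0 + x]) [c + v] t := by
        rw [List.foldl_cons]
        exact pvPrefixAppend t [c] [c + v] (by simp)
      rw [hfv]
      cases i with
      | zero => simp
      | succ i' =>
          simp only [List.cons_append, List.nil_append, List.getElem?_cons_succ]
          rw [ih (c + v) i' (by simpa using h)]
          simp [List.take_succ_cons]
          omega

-- every integer is counted by exactly one of the two parity filters
theorem pvLenSplit (l : List Int) :
    l.length = (l.filter (fun v => decide (PySem.Int.mod v 2 = 1))).length +
               (l.filter (fun v => decide (PySem.Int.mod v 2 = 0))).length := by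
  induction l with
  | nil => rfl
  | cons x t ih =>
      simp only [List.filter_cons]
      rcases pvMod2_cases x with h | h
      · have h1 : (decide (PySem.Int.mod x 2 = 1)) = false := by rw [h]; rfl
        have h0 : (decide (PySem.Int.mod x 2 = 0)) = true := by rw [h]; rfl
        rw [h1, h0]
        simp only [if_true, Bool.false_eq_true, if_false, List.length_cons]
        omega
      · have h1 : (decide (PySem.Int.mod x 2 = 1)) = true := by rw [h]; rfl
        have h0 : (decide (PySem.Int.mod x 2 = 0)) = false := by rw [h]; rfl
        rw [h1, h0]
        simp only [if_true, Bool.false_eq_true, if_false, List.length_cons]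
        omega

theorem pvSumSplit (l : List Int) :
    l.sum = (l.filter (fun v => decide (PySem.Int.mod v 2 = 1))).sum +
            (l.filter (fun v => decide (PySem.Int.mod v 2 = 0))).sum := by
  induction l with
  | nil => rfl
  | cons x t ih =>
      simp only [List.filter_cons]
      rcases pvMod2_cases x with h | h
      · have h1 : (decide (PySem.Int.mod x 2 = 1)) = false := by rw [h]; rfl
        have h0 : (decide (PySem.Int.mod x 2 = 0)) = true := by rw [h]; rfl
        rw [h1, h0]
        simp only [if_true, Bool.false_eq_true, if_false, List.sum_cons]
        omega
      · have h1 : (decide (PySem.Int.mod x 2 = 1)) = true := by rw [h]; rfl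
        have h0 : (decide (PySem.Int.mod x 2 = 0)) = false := by rw [h]; rfl
        rw [h1, h0]
        simp only [if_true, Bool.false_eq_true, if_false, List.sum_cons]
        omega

-- the sum of a nonempty list is the sum of all but its last element, plus the last
theorem pvTakePredSum (l : List Int) (h : l ≠ []) :
    (l.take (l.length - 1)).sum + l.getLast h = l.sum := by
  induction l with
  | nil => exact absurd rfl h
  | cons x t ih =>
      cases t with
      | nil => simp
      | cons y u =>
          have ht : (y :: u) ≠ ([] : List Int) := by simp
          rw [List.getLast_cons ht]
          have hlen : (x :: y :: u).length - 1 = ((y :: u).length - 1) + 1 := by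
            simp
          rw [hlen, List.take_succ_cons, List.sum_cons, List.sum_cons, add_assoc,
              ih ht]

-- reading the prefix-sum tables: entry n is the sum of the first n elements
theorem pvGetPred (A B : List Int) (h : 1 ≤ A.length) :
    (PySem.List.pyGet? (List.foldl (fun acc v => acc ++ [acc.getLastD 0 + v]) [0] (A ++ B))
        ((A.length : Int) - 1)).getD 0 = (A.take (A.length - 1)).sum := by
  rw [show ((A.length : Int) - 1) = ((A.length - 1 : Nat) : Int) by omega,
      PySem.List.pyGet?_natCast, pvPrefixGet (A ++ B) 0 (A.length - 1) (by simp; omega),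
      List.take_append_of_le_length (by omega)]
  simp

theorem pvGetNext (A : List Int) (w : Int) (tw : List Int) :
    (PySem.List.pyGet? (List.foldl (fun acc v => acc ++ [acc.getLastD 0 + v]) [0] (A ++ (w :: tw)))
        ((A.length : Int) + 1)).getD 0 = A.sum + w := by
  rw [show ((A.length : Int) + 1) = ((A.length + 1 : Nat) : Int) by omega,
      PySem.List.pyGet?_natCast, pvPrefixGet (A ++ (w :: tw)) 0 (A.length + 1) (by simp),
      List.take_append, List.take_of_length_le (by omega),
      show A.length + 1 - A.length = 1 by omega]
  simp

theorem pvBridge (L : List Int) (k : Nat) (hL : L.Pairwise (fun a b => b ≤ a))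
    (hk1 : 1 ≤ k) (hkL : k ≤ L.length) (hodd : (L.take k).sum % 2 = 1) :
    (let sel := L.take k
     let t := L.drop k
     let s := sel.sum
     let minOdd := (sel.filter (fun v => decide (PySem.Int.mod v 2 = 1))).min?
     let minEven := (sel.filter (fun v => decide (PySem.Int.mod v 2 = 0))).min?
     let maxOdd := (t.filter (fun v => decide (PySem.Int.mod v 2 = 1))).max?
     let maxEven := (t.filter (fun v => decide (PySem.Int.mod v 2 = 0))).max?
     let c1 := match maxEven with
       | some me => s - minOdd.getD 0 + me
       | none => 0
     match minEven with
     | none => c1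
     | some mEv =>
         let c2 := match maxOdd with
           | some mo => s - mEv + mo
           | none => 0
         max c1 c2) =
    (let sel := L.take k
     let odds := L.filter (fun v => decide (PySem.Int.mod v 2 = 1))
     let evens := L.filter (fun v => decide (PySem.Int.mod v 2 = 0))
     let po := odds.foldl (fun acc v => acc ++ [acc.getLastD 0 + v]) [0]
     let pe := evens.foldl (fun acc v => acc ++ [acc.getLastD 0 + v]) [0]
     let j := (sel.filter (fun v => decide (PySem.Int.mod v 2 = 1))).length
     let e := sel.length - j
     let c1 := if e + 1 ≤ evens.length then
         (PySem.List.pyGet? po ((j : Int) - 1)).getD 0 + (PySem.List.pyGet? pe ((e : Int) + 1)).getD 0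
       else 0
     if e = 0 then c1
     else
       let c2 := if j + 1 ≤ odds.length then
           (PySem.List.pyGet? po ((j : Int) + 1)).getD 0 + (PySem.List.pyGet? pe ((e : Int) - 1)).getD 0
         else 0
       max c1 c2) := by
  have hseld : (L.take k).Pairwise (fun a b => b ≤ a) := hL.sublist (List.take_sublist k L)
  have htd : (L.drop k).Pairwise (fun a b => b ≤ a) := hL.sublist (List.drop_sublist k L)
  have hsplit : L.take k ++ L.drop k = L := List.take_append_drop k L
  have hodds : L.filter (fun v => decide (PySem.Int.mod v 2 = 1)) =
      (L.take k).filter (fun v => decide (PySem.Int.mod v 2 = 1)) ++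
      (L.drop k).filter (fun v => decide (PySem.Int.mod v 2 = 1)) := by
    conv_lhs => rw [← hsplit]
    rw [List.filter_append]
  have hevens : L.filter (fun v => decide (PySem.Int.mod v 2 = 0)) =
      (L.take k).filter (fun v => decide (PySem.Int.mod v 2 = 0)) ++
      (L.drop k).filter (fun v => decide (PySem.Int.mod v 2 = 0)) := by
    conv_lhs => rw [← hsplit]
    rw [List.filter_append]
  have hSOne : (L.take k).filter (fun v => decide (PySem.Int.mod v 2 = 1)) ≠ [] :=
    pvOddMem _ hodd
  have hSOpos : 1 ≤ ((L.take k).filter (fun v => decide (PySem.Int.mod v 2 = 1))).length :=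
    List.length_pos_iff.mpr hSOne
  have hlsplit := pvLenSplit (L.take k)
  have hssplit := pvSumSplit (L.take k)
  have hE : (L.take k).length -
      ((L.take k).filter (fun v => decide (PySem.Int.mod v 2 = 1))).length =
      ((L.take k).filter (fun v => decide (PySem.Int.mod v 2 = 0))).length := by omega
  simp only [hodds, hevens, hE, hssplit,
    pvMin?_desc _ (hseld.filter _), pvMax?_desc _ (htd.filter _),
    List.getLast?_eq_some_getLast hSOne, Option.getD_some]
  have htpSO := pvTakePredSum _ hSOne
  generalize hlo : ((L.take k).filter (fun v => decide (PySem.Int.mod v 2 = 1))).getLast hSOne = lo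
  rw [hlo] at htpSO
  clear hlo hSOne hodd hodds hevens hE hssplit hsplit hseld htd hL hlsplit hk1 hkL
  revert hSOpos htpSO
  generalize (L.take k).filter (fun v => decide (PySem.Int.mod v 2 = 1)) = so
  generalize (L.take k).filter (fun v => decide (PySem.Int.mod v 2 = 0)) = se
  generalize (L.drop k).filter (fun v => decide (PySem.Int.mod v 2 = 1)) = tdo
  generalize (L.drop k).filter (fun v => decide (PySem.Int.mod v 2 = 0)) = tde
  intro hSOpos htpSO
  rcases se with _ | ⟨z, tz⟩
  · -- no even card selected: A keeps only the first candidate, B takes the if-branch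
    rw [if_pos (show ([] : List Int).length = 0 from rfl)]
    simp only [List.getLast?_nil]
    rcases tde with _ | ⟨w, tw⟩
    · rw [if_neg (by simp)]
      simp
    · simp only [List.head?_cons]
      rw [if_pos (by simp)]
      rw [pvGetPred so tdo hSOpos, pvGetNext [] w tw]
      simp only [List.sum_nil]
      omega
  · -- an even card is selected: both sides take a max of two candidates
    have hzne : (z :: tz) ≠ ([] : List Int) := by simp
    rw [if_neg (by simp), List.getLast?_eq_some_getLast hzne]
    have htpSE := pvTakePredSum (z :: tz) hzne
    simp only []
    congr 1
    · rcases tde with _ | ⟨w, tw⟩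
      · rw [if_neg (by simp)]
        simp
      · simp only [List.head?_cons]
        rw [if_pos (by simp)]
        rw [pvGetPred so tdo hSOpos, pvGetNext (z :: tz) w tw]
        omega
    · rcases tdo with _ | ⟨w2, tw2⟩
      · rw [if_neg (by simp)]
        simp
      · simp only [List.head?_cons]
        rw [if_pos (by simp)]
        rw [pvGetNext so w2 tw2, pvGetPred (z :: tz) tde (by simp)]
        omega

-- the odd branch, after both ports' slices are rewritten to take/drop of the sorted list
theorem pvMain (L : List Int) (k : Nat) (hL : L.Pairwise (fun a b => b ≤ a))
    (hk1 : 1 ≤ k) (hkL : k ≤ L.length) (hodd : (L.take k).sum % 2 = 1) :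
    (match L[k - 1]? with
     | none => (0 : Int)
     | some cur =>
         match pvFindOpp ((some ((L.take k).reverse)).getD []) cur with
         | none => pvReplaceSum (L.drop k) (L.take k).sum cur
         | some v =>
             max (pvReplaceSum (L.drop k) (L.take k).sum cur)
                 (pvReplaceSum (L.drop k) (L.take k).sum v)) =
    (let sel := L.take k
     let odds := L.filter (fun v => decide (PySem.Int.mod v 2 = 1))
     let evens := L.filter (fun v => decide (PySem.Int.mod v 2 = 0))
     let po := odds.foldl (fun acc v => acc ++ [acc.getLastD 0 + v]) [0]
     let pe := evens.foldl (fun acc v => acc ++ [acc.getLastD 0 + v]) [0]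
     let j := (sel.filter (fun v => decide (PySem.Int.mod v 2 = 1))).length
     let e := sel.length - j
     let c1 := if e + 1 ≤ evens.length then
         (PySem.List.pyGet? po ((j : Int) - 1)).getD 0 + (PySem.List.pyGet? pe ((e : Int) + 1)).getD 0
       else 0
     if e = 0 then c1
     else
       let c2 := if j + 1 ≤ odds.length then
           (PySem.List.pyGet? po ((j : Int) + 1)).getD 0 + (PySem.List.pyGet? pe ((e : Int) - 1)).getD 0
         else 0
       max c1 c2) := by
  have hne : L.take k ≠ [] := by
    intro hnil; rw [hnil] at hodd; simp at hodd
  rw [List.getElem?_eq_getElem (by omega)]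
  have hcur : L[k - 1]'(by omega) = (L.take k).getLast hne := by
    rw [List.getLast_eq_getElem, List.getElem_take]
    congr 1
    simp [List.length_take]
    omega
  simp only [Option.getD_some, hcur]
  exact (pvCore (L.take k) (L.drop k) (L.take k).sum
    (hL.sublist (List.take_sublist k L)) (hL.sublist (List.drop_sublist k L)) hne hodd).trans
    (pvBridge L k hL hk1 hkL hodd)

-- ===== VERDICT (by name: the statement is the Claim_ definition above) =====
theorem maxmiumScore_spec : Claim_equal_maxmiumScore := by
  intro cards cnt _ hpre
  unfold Spec_maxmiumScore maxmiumScore maxmiumScore_alt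
  have hL : (PySem.List.sorted cards (fun x => x) true).Pairwise (fun a b => b ≤ a) :=
    PySem.List.sorted_pairwise_rev cards (fun x => x)
  set L := PySem.List.sorted cards (fun x => x) true with hLdef
  have hlenL : L.length = cards.length := by
    rw [hLdef]; exact PySem.List.length_sorted cards (fun x => x) true
  have hsum : L.sum = cards.sum := by
    rw [hLdef]; exact (PySem.List.sorted_perm cards (fun x => x) true).sum_eq
  by_cases hs : PySem.Int.mod (PySem.List.slice L none (some cnt)).sum 2 = 0
  · rw [if_pos hs, if_pos hs]
  · rw [if_neg hs, if_neg hs]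
    have hoddP : (PySem.List.slice L none (some cnt)).sum % 2 = 1 := by
      rw [pvMod2_emod] at hs; omega
    rcases hpre with ⟨hr1a, hr1b⟩ | hr2 | ⟨hr3a, hr3b⟩
    · -- the valid-index region 1-len ≤ cnt ≤ len
      rcases lt_trichotomy cnt 0 with hneg | h0 | hpos
      · -- negative cnt: Python wraps slices and the index
        have hm0 : 0 < (-cnt).toNat := by omega
        set m := (-cnt).toNat with hmdef
        have hmlen : m + 1 ≤ L.length := by rw [hlenL]; omega
        rw [show cnt = -((m : Nat) : Int) by omega] at hoddP ⊢
        rw [PySem.List.slice_to_neg_natCast L m hm0] at hoddP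
        rw [PySem.List.slice_to_neg_natCast L m hm0, PySem.List.slice_from_neg_natCast L m hm0]
        rw [show -((m : Nat) : Int) - 1 = -(((m + 1 : Nat)) : Int) by push_cast; ring]
        rw [PySem.List.pyGet?_neg_natCast L (m + 1) (by omega) (by omega)]
        rw [pvSliceBackNeg L (m + 1) (by omega) hmlen]
        rw [show L.length - (m + 1) + 1 = L.length - m by omega,
            show L.length - (m + 1) = (L.length - m) - 1 by omega]
        exact pvMain L (L.length - m) hL (by omega) (by omega) hoddP
      · -- cnt = 0 selects nothing, sum 0 is even: contradiction
        exfalso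
        rw [h0, PySem.List.slice_to L (b := 0) (by omega)] at hoddP
        simp at hoddP
      · -- positive cnt: the proper prefix of length cnt
        set k := cnt.toNat with hkdef
        have hkL : k ≤ L.length := by rw [hlenL]; omega
        rw [show cnt = ((k : Nat) : Int) by omega] at hoddP ⊢
        rw [PySem.List.slice_to_natCast] at hoddP
        rw [PySem.List.slice_to_natCast, PySem.List.slice_from_natCast]
        rw [show ((k : Nat) : Int) - 1 = ((k - 1 : Nat) : Int) by omega,
            PySem.List.pyGet?_natCast, pvSliceBack L (k - 1) (by omega),
            Nat.sub_add_cancel (by omega)]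
        exact pvMain L k hL (by omega) hkL hoddP
    · -- cnt ≤ -len selects nothing, sum 0 is even: contradiction
      exfalso
      have hempty : PySem.List.slice L none (some cnt) = [] := by
        rcases lt_or_ge cnt 0 with hneg | hge
        · have hm0 : 0 < (-cnt).toNat := by omega
          rw [show cnt = -(((-cnt).toNat : Nat) : Int) by omega,
              PySem.List.slice_to_neg_natCast L ((-cnt).toNat) hm0,
              show L.length - (-cnt).toNat = 0 by omega]
          rfl
        · have h0 : cnt = 0 := by omega
          rw [h0, PySem.List.slice_to L (b := 0) (by omega)]
          rfl
      rw [hempty] at hoddP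
      simp at hoddP
    · -- cnt > len selects the whole list, whose sum is even: contradiction
      exfalso
      have hfull : PySem.List.slice L none (some cnt) = L := by
        rw [show cnt = ((cnt.toNat : Nat) : Int) by omega, PySem.List.slice_to_natCast]
        exact List.take_of_length_le (by omega)
      rw [hfull, hsum] at hoddP
      omega

@[simp]
theorem maxmiumScore_raises : Claim_raises_maxmiumScore := by
  unfold Claim_raises_maxmiumScore
  constructor
  · intro cards cnt _ hr hpre
    obtain ⟨hlt, hodd⟩ := hr
    rcases hpre with ⟨h1, h2⟩ | h2 | ⟨h3, h4⟩ <;> omega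
  · exact ⟨by decide, by decide, by decide⟩
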